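-- pv_equiv track=rewrite | github.com/yongyuwang123/news-aggregation-platform | src/data_sources/hacker_news.py | filter_tech_related
-- ===== SOURCE A (Python) =====
-- from typing import List, Dict, Optional
--
-- def filter_tech_related(stories: List[Dict]) -> List[Dict]:
--     """
--     过滤出技术相关的内容（可选）
--
--     可以根据标题关键词过滤，排除非技术内容
--     """
--     tech_keywords = [
--         'python', 'javascript', 'rust', 'go', 'java', 'ai', 'ml',
--         'programming', 'code', 'software', 'web', 'app', 'startup',
--         'database', 'cloud', 'dev', 'tech', 'computer', 'linux',
--         'open source', 'github', 'api', 'framework', 'library'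
--     ]
--
--     filtered = []
--     for story in stories:
--         title = story['title'].lower()
--         # 如果标题包含任何技术关键词，保留
--         if any(keyword in title for keyword in tech_keywords):
--             filtered.append(story)
--
--     return filtered
-- ===== SOURCE B (Python) =====
-- TECH_KEYWORDS = [
--     'python', 'javascript', 'rust', 'go', 'java', 'ai', 'ml',
--     'programming', 'code', 'software', 'web', 'app', 'startup',
--     'database', 'cloud', 'dev', 'tech', 'computer', 'linux',
--     'open source', 'github', 'api', 'framework', 'library'
-- ]
--
-- KWSET = set(TECH_KEYWORDS)
-- LENGTHS = {len(kw) for kw in TECH_KEYWORDS}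
--
--
-- def _is_tech(title):
--     # inverted lookup: collect all n-grams of the lowered title (for the keyword
--     # lengths) into a hash set, then test whether it meets the keyword set —
--     # no per-keyword substring search at all
--     t = title.lower()
--     grams = {t[i:i + L] for L in LENGTHS for i in range(len(t) - L + 1)}
--     return not KWSET.isdisjoint(grams)
--
--
-- def filter_tech_related(stories):
--     return [story for story in stories if _is_tech(story['title'])]
-- ===== Notes on version B (the rewrite author's own statement) =====
-- stated objective: alternative
-- what changed: Inverts the membership test: instead of searching each keyword in each title, B collects all n-grams of the lowered title (for the keyword lengths) into a hash set once and intersects it with the keyword set, so the per-keyword substring scan disappears.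
import Mathlib
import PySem

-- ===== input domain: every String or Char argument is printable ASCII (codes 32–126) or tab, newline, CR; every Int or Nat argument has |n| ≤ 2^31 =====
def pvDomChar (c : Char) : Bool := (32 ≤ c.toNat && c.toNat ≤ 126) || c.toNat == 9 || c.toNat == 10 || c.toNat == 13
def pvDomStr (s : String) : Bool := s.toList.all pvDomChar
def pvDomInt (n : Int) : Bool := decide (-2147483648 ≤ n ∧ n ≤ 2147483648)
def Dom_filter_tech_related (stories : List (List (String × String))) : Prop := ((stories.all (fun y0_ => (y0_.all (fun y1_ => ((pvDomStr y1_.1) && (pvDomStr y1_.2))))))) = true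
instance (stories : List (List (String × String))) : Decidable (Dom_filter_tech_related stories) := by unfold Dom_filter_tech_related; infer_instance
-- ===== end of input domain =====

-- B inverts the membership test: it collects all n-grams of the lowered title (for
-- the keyword lengths) into a set once and intersects that with the keyword set,
-- instead of A's per-keyword substring search; alternative algorithm, same results.


-- ===== PORT A =====
def techKeywords : List String :=
  ["python", "javascript", "rust", "go", "java", "ai", "ml",
   "programming", "code", "software", "web", "app", "startup",
   "database", "cloud", "dev", "tech", "computer", "linux",
   "open source", "github", "api", "framework", "library"]

def filter_tech_related (stories : List (List (String × String))) : List (List (String × String)) :=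
  stories.foldl (fun filtered story =>
    match PySem.Dict.get? ⟨story⟩ "title" with
    | none => filtered  -- KeyError in Python; excluded by Pre_
    | some title =>
        let t := PySem.Str.lower title
        if techKeywords.any (fun kw => PySem.Str.isIn kw t) then filtered ++ [story]
        else filtered) []

-- ===== PORT B =====
-- KWSET = set(TECH_KEYWORDS), as lists of chars
def kwSet : PySem.Set (List Char) :=
  PySem.Set.ofList (techKeywords.map String.toList)

-- LENGTHS = {len(kw) for kw in TECH_KEYWORDS}
def kwLens : PySem.Set Nat :=
  PySem.Set.ofList (techKeywords.map (fun kw => kw.toList.length))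

-- grams = {t[i:i+L] for L in LENGTHS for i in range(len(t)-L+1)}
-- (t.length + 1 - L is Nat subtraction = max(0, len(t)-L+1), exactly Python's range length)
def grams (t : List Char) : PySem.Set (List Char) :=
  PySem.Set.ofList ((kwLens : List Nat).flatMap (fun L =>
    (List.range (t.length + 1 - L)).map (fun (i : Nat) =>
      PySem.List.slice t (some (i : Int)) (some ((i : Int) + (L : Int))))))

def filter_tech_related_alt (stories : List (List (String × String))) : List (List (String × String)) :=
  stories.filter (fun story =>
    match PySem.Dict.get? ⟨story⟩ "title" with
    | none => false  -- KeyError in Python; excluded by Pre_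
    | some title => !(PySem.Set.isdisjoint kwSet (grams (PySem.Chars.lower title.toList))))

-- ===== PRECONDITION & SPEC =====
-- Pre_: both Pythons raise KeyError on a story without a "title" key; exactly those inputs are excluded.
def Pre_filter_tech_related (stories : List (List (String × String))) : Prop :=
  ∀ story ∈ stories, (PySem.Dict.get? (⟨story⟩ : PySem.Dict String String) "title").isSome

instance (stories : List (List (String × String))) : Decidable (Pre_filter_tech_related stories) := by
  unfold Pre_filter_tech_related; infer_instance

def pvWitness_filter_tech_related : (List (List (String × String))) :=
  [[("title", "A Python story")], [("title", "gardening"), ("url", "x")]]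

def Spec_filter_tech_related (stories : List (List (String × String))) (out : List (List (String × String))) : Prop := out = filter_tech_related_alt stories
instance (stories : List (List (String × String))) (out : List (List (String × String))) : Decidable (Spec_filter_tech_related stories out) := by unfold Spec_filter_tech_related; infer_instance

-- ===== CLAIM (what is proved, stated in full; the proofs are below) =====
def Claim_equal_filter_tech_related : Prop := ∀ (stories : List (List (String × String))), Dom_filter_tech_related stories → Pre_filter_tech_related stories → Spec_filter_tech_related stories (filter_tech_related stories)

-- ===== LEMMAS AND PROOFS =====

-- a keyword's gram is in the gram set iff the keyword is an infix of the title
theorem mem_grams_iff_infix (kw : String) (hkw : kw ∈ techKeywords) (t : List Char) :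
    kw.toList ∈ grams t ↔ kw.toList <:+: t := by
  unfold grams
  rw [PySem.Set.mem_ofList, List.mem_flatMap]
  constructor
  · rintro ⟨L, _, hmem⟩
    obtain ⟨i, _, heq⟩ := List.mem_map.mp hmem
    rw [← heq, PySem.List.slice_natCast_add]
    exact ((List.take_prefix _ _).isInfix).trans ((List.drop_suffix _ _).isInfix)
  · rintro ⟨s1, s2, h⟩
    refine ⟨kw.toList.length, ?_, List.mem_map.mpr ⟨s1.length, List.mem_range.mpr ?_, ?_⟩⟩
    · unfold kwLens
      rw [PySem.Set.mem_ofList]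
      exact List.mem_map.mpr ⟨kw, hkw, rfl⟩
    · have hlen := congrArg List.length h
      simp only [List.length_append] at hlen
      omega
    · rw [PySem.List.slice_natCast_add, ← h, List.append_assoc, List.drop_left,
        List.take_left]

-- B's "gram set meets keyword set" test equals A's "any keyword in title" test
theorem isTech_eq (title : String) :
    (!(PySem.Set.isdisjoint kwSet (grams (PySem.Chars.lower title.toList))))
      = techKeywords.any (fun kw => PySem.Str.isIn kw (PySem.Str.lower title)) := by
  rw [Bool.eq_iff_iff, Bool.not_eq_true', Bool.eq_false_iff, Ne, PySem.Set.isdisjoint_iff]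
  push Not
  simp only [List.any_eq_true, PySem.Str.isIn_iff_infix, PySem.Str.toList_lower]
  constructor
  · rintro ⟨x, hx, hg⟩
    have hx' : x ∈ techKeywords.map String.toList := by
      have := (PySem.Set.mem_ofList (xs := techKeywords.map String.toList) (y := x)).mp hx
      exact this
    obtain ⟨kw, hkw, rfl⟩ := List.mem_map.mp hx'
    exact ⟨kw, hkw, (mem_grams_iff_infix kw hkw _).mp hg⟩
  · rintro ⟨kw, hkw, hinf⟩
    refine ⟨kw.toList, ?_, ?_⟩
    · unfold kwSet
      rw [PySem.Set.mem_ofList]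
      exact List.mem_map.mpr ⟨kw, hkw, rfl⟩
    · exact (mem_grams_iff_infix kw hkw _).mpr hinf

-- A's foldl with append accumulator is B's filter
theorem foldl_eq_filter (stories : List (List (String × String)))
    (acc : List (List (String × String))) :
    stories.foldl (fun filtered story =>
      match PySem.Dict.get? (⟨story⟩ : PySem.Dict String String) "title" with
      | none => filtered
      | some title =>
          let t := PySem.Str.lower title
          if techKeywords.any (fun kw => PySem.Str.isIn kw t) then filtered ++ [story]
          else filtered) acc
    = acc ++ stories.filter (fun story =>
        match PySem.Dict.get? (⟨story⟩ : PySem.Dict String String) "title" with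
        | none => false
        | some title => !(PySem.Set.isdisjoint kwSet (grams (PySem.Chars.lower title.toList)))) := by
  induction stories generalizing acc with
  | nil => simp
  | cons story rest ih =>
      simp only [List.foldl_cons, List.filter_cons]
      cases PySem.Dict.get? (⟨story⟩ : PySem.Dict String String) "title" with
      | none => exact ih acc
      | some title =>
          simp only [← isTech_eq title]
          by_cases h : (!(PySem.Set.isdisjoint kwSet (grams (PySem.Chars.lower title.toList)))) = true
          · simp only [h, if_true]
            rw [ih]
            simp [List.append_assoc]
          · rw [Bool.not_eq_true] at h
            simp only [h, Bool.false_eq_true, if_false]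
            exact ih acc

-- ===== VERDICT (by name: the statement is the Claim_ definition above) =====
theorem filter_tech_related_spec : Claim_equal_filter_tech_related := by
  intro stories _ _
  unfold Spec_filter_tech_related filter_tech_related filter_tech_related_alt
  simpa using foldl_eq_filter stories []
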